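-- pv_equiv track=rewrite | github.com/gregjonesdev/derbylane | pww/management/commands/exotic_test.py | get_unique_trifectas
-- ===== SOURCE A (Python) =====
-- def get_unique_trifectas(matches_first, matches_second, matches_third):
--     unique_trifectas = []
--     i = 0
--     while i < len(matches_first):
--         first = matches_first[i]
--         j = 0
--         while j < len(matches_second):
--             second = matches_second[j]
--             k = 0
--             while k < len(matches_third):
--                 third = matches_third[k]
--                 if not (
--                     first == second or
--                     first == third or
--                     second == third):
--                     if not (first, second, third) in unique_trifectas:
--                         unique_trifectas.append((first, second, third))
--                 k += 1
--             j += 1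
--         i += 1
--
--     return unique_trifectas
-- ===== SOURCE B (Python) =====
-- def get_unique_trifectas(matches_first, matches_second, matches_third):
--     def dedup(values):
--         seen = []
--         for value in values:
--             if value not in seen:
--                 seen.append(value)
--         return seen
--     firsts = dedup(matches_first)
--     seconds = dedup(matches_second)
--     thirds = dedup(matches_third)
--     unique_trifectas = []
--     for first in firsts:
--         for second in seconds:
--             for third in thirds:
--                 if first != second and first != third and second != third:
--                     unique_trifectas.append((first, second, third))
--     return unique_trifectas
-- ===== Notes on version B (the rewrite author's own statement) =====
-- stated objective: faster
-- what changed: B first deduplicates each of the three input lists (first-occurrence order, list-based membership), then emits every pairwise-distinct triple from the triple product directly, dropping A's per-triple membership scan of the growing output list.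
import Mathlib
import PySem

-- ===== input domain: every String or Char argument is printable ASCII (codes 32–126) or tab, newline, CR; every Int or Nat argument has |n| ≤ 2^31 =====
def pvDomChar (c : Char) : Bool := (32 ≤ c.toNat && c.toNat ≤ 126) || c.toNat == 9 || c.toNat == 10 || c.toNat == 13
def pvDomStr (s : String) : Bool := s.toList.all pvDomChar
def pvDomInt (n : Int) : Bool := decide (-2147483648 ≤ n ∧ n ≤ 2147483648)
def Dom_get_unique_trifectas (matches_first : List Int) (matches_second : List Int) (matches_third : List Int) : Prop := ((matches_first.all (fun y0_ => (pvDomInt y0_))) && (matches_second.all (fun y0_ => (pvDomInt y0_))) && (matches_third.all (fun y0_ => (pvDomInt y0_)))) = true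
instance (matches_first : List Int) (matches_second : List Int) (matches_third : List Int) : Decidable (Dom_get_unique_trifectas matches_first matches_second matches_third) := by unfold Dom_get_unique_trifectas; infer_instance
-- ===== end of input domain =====

-- B deduplicates each input list up front and then emits every pairwise-distinct triple
-- with no output-membership scan (alternative decomposition; faster when inputs repeat).

-- ===== PORT A =====
-- A's three nested index-walking while loops, ported as folds over the same elements in
-- the same order, with the same membership-check-then-append accumulator.
def get_unique_trifectas (matches_first : List Int) (matches_second : List Int) (matches_third : List Int) : List (Int × Int × Int) :=
  matches_first.foldl (fun acc first =>
    matches_second.foldl (fun acc second =>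
      matches_third.foldl (fun acc third =>
        if ¬(first = second ∨ first = third ∨ second = third) then
          (if (first, second, third) ∈ acc then acc else acc ++ [(first, second, third)])
        else acc) acc) acc) []

-- ===== PORT B =====
-- Source B's dedup helper: seen-list built left to right with an `in` membership test.
def pvDedup (xs : List Int) : List Int :=
  xs.foldl (fun seen x => if x ∈ seen then seen else seen ++ [x]) []

def get_unique_trifectas_alt (matches_first : List Int) (matches_second : List Int) (matches_third : List Int) : List (Int × Int × Int) :=
  let firsts := pvDedup matches_first
  let seconds := pvDedup matches_second
  let thirds := pvDedup matches_third
  firsts.foldl (fun acc first =>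
    seconds.foldl (fun acc second =>
      thirds.foldl (fun acc third =>
        if first ≠ second ∧ first ≠ third ∧ second ≠ third then
          acc ++ [(first, second, third)]
        else acc) acc) acc) []

-- ===== PRECONDITION & SPEC =====
def Spec_get_unique_trifectas (matches_first : List Int) (matches_second : List Int) (matches_third : List Int) (out : List (Int × Int × Int)) : Prop := out = get_unique_trifectas_alt matches_first matches_second matches_third
instance (matches_first : List Int) (matches_second : List Int) (matches_third : List Int) (out : List (Int × Int × Int)) : Decidable (Spec_get_unique_trifectas matches_first matches_second matches_third out) := by unfold Spec_get_unique_trifectas; infer_instance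

-- ===== CLAIM (what is proved, stated in full; the proofs are below) =====
def Claim_equal_get_unique_trifectas : Prop := ∀ (matches_first : List Int) (matches_second : List Int) (matches_third : List Int), Dom_get_unique_trifectas matches_first matches_second matches_third → Spec_get_unique_trifectas matches_first matches_second matches_third (get_unique_trifectas matches_first matches_second matches_third)

-- ===== LEMMAS AND PROOFS =====

-- the stream of pairwise-distinct triples in A's visiting order
def pvG (a b c : Int) : List (Int × Int × Int) :=
  if a = b ∨ a = c ∨ b = c then [] else [(a, b, c)]

def pvB3 (a b : Int) (l3 : List Int) : List (Int × Int × Int) := l3.flatMap (pvG a b)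

def pvB2 (a : Int) (l2 l3 : List Int) : List (Int × Int × Int) :=
  l2.flatMap (fun b => pvB3 a b l3)

def pvStream (l1 l2 l3 : List Int) : List (Int × Int × Int) :=
  l1.flatMap (fun a => pvB2 a l2 l3)

-- first-occurrence deduplication of a stream of triples (A's membership-check accumulator)
def pvD (acc s : List (Int × Int × Int)) : List (Int × Int × Int) :=
  s.foldl (fun acc t => if t ∈ acc then acc else acc ++ [t]) acc

-- recursive form of pvDedup
def pvDedupAux (seen : List Int) : List Int → List Int
  | [] => []
  | x :: xs => if x ∈ seen then pvDedupAux seen xs else x :: pvDedupAux (seen ++ [x]) xs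

theorem pvFoldl_flatMap {α β γ : Type} (f : γ → β → γ) (h : α → List β) :
    ∀ (l : List α) (init : γ),
      (l.flatMap h).foldl f init = l.foldl (fun acc a => (h a).foldl f acc) init := by
  intro l
  induction l with
  | nil => intro init; rfl
  | cons x xs ih => intro init; simp [List.flatMap_cons, List.foldl_append, ih]

theorem mem_pvD (t : Int × Int × Int) :
    ∀ (s acc : List (Int × Int × Int)), t ∈ pvD acc s ↔ t ∈ acc ∨ t ∈ s := by
  intro s
  induction s with
  | nil => intro acc; simp [pvD]
  | cons u us ih =>
      intro acc
      by_cases hu : u ∈ acc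
      · simp only [pvD, List.foldl_cons, if_pos hu]
        rw [show (List.foldl _ acc us) = pvD acc us from rfl, ih]
        constructor
        · rintro (h | h)
          · exact Or.inl h
          · exact Or.inr (List.mem_cons_of_mem _ h)
        · rintro (h | h)
          · exact Or.inl h
          · rcases List.mem_cons.mp h with h | h
            · exact Or.inl (h ▸ hu)
            · exact Or.inr h
      · simp only [pvD, List.foldl_cons, if_neg hu]
        rw [show (List.foldl _ (acc ++ [u]) us) = pvD (acc ++ [u]) us from rfl, ih]
        simp [List.mem_append, List.mem_cons]
        tauto

theorem pvD_of_subset : ∀ (s acc : List (Int × Int × Int)), (∀ t ∈ s, t ∈ acc) → pvD acc s = acc := by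
  intro s
  induction s with
  | nil => intro acc _; rfl
  | cons u us ih =>
      intro acc h
      have hu : u ∈ acc := h u (List.mem_cons_self)
      simp only [pvD, List.foldl_cons, if_pos hu]
      exact ih acc (fun t ht => h t (List.mem_cons_of_mem _ ht))

theorem pvD_nodup_disjoint : ∀ (s acc : List (Int × Int × Int)),
    s.Nodup → (∀ t ∈ s, t ∉ acc) → pvD acc s = acc ++ s := by
  intro s
  induction s with
  | nil => intro acc _ _; simp [pvD]
  | cons u us ih =>
      intro acc hnd hdisj
      have hu : u ∉ acc := hdisj u (List.mem_cons_self)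
      simp only [pvD, List.foldl_cons, if_neg hu]
      rw [show (List.foldl _ (acc ++ [u]) us) = pvD (acc ++ [u]) us from rfl]
      rw [ih (acc ++ [u]) (List.Nodup.of_cons hnd)]
      · simp
      · intro t ht
        simp only [List.mem_append, List.mem_singleton]
        rintro (h | rfl)
        · exact hdisj t (List.mem_cons_of_mem _ ht) h
        · exact (List.nodup_cons.mp hnd).1 ht

theorem pvDedup_eq_aux : ∀ (xs seen : List Int),
    xs.foldl (fun s x => if x ∈ s then s else s ++ [x]) seen = seen ++ pvDedupAux seen xs := by
  intro xs
  induction xs with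
  | nil => intro seen; simp [pvDedupAux]
  | cons x xs ih =>
      intro seen
      by_cases hx : x ∈ seen
      · simp [pvDedupAux, hx, ih]
      · simp only [List.foldl_cons, if_neg hx, pvDedupAux, ih (seen ++ [x])]
        simp

theorem pvDedup_def (xs : List Int) : pvDedup xs = pvDedupAux [] xs := by
  simpa using pvDedup_eq_aux xs []

theorem mem_pvDedupAux (a : Int) :
    ∀ (xs seen : List Int), a ∈ pvDedupAux seen xs ↔ a ∈ xs ∧ a ∉ seen := by
  intro xs
  induction xs with
  | nil => intro seen; simp [pvDedupAux]
  | cons x xs ih =>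
      intro seen
      by_cases hx : x ∈ seen
      · simp only [pvDedupAux, if_pos hx, ih]
        constructor
        · rintro ⟨h1, h2⟩; exact ⟨List.mem_cons_of_mem _ h1, h2⟩
        · rintro ⟨h1, h2⟩
          rcases List.mem_cons.mp h1 with rfl | h1
          · exact absurd hx h2
          · exact ⟨h1, h2⟩
      · simp only [pvDedupAux, if_neg hx, List.mem_cons, ih]
        simp only [List.mem_append, List.mem_singleton]
        constructor
        · rintro (rfl | ⟨h1, h2⟩)
          · exact ⟨Or.inl rfl, hx⟩
          · exact ⟨Or.inr h1, fun h => h2 (Or.inl h)⟩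
        · rintro ⟨rfl | h1, h2⟩
          · exact Or.inl rfl
          · by_cases hax : a = x
            · exact Or.inl hax
            · exact Or.inr ⟨h1, by simp [h2, hax]⟩

theorem nodup_pvDedupAux : ∀ (xs seen : List Int), (pvDedupAux seen xs).Nodup := by
  intro xs
  induction xs with
  | nil => intro seen; simp [pvDedupAux]
  | cons x xs ih =>
      intro seen
      by_cases hx : x ∈ seen
      · simp only [pvDedupAux, if_pos hx]; exact ih seen
      · simp only [pvDedupAux, if_neg hx, List.nodup_cons]
        refine ⟨fun h => ?_, ih _⟩
        have := (mem_pvDedupAux x xs (seen ++ [x])).mp h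
        simp at this

theorem nodup_pvDedup (xs : List Int) : (pvDedup xs).Nodup := by
  rw [pvDedup_def]; exact nodup_pvDedupAux xs []

-- processing a list of "blocks" through pvD skips already-seen elements: dedup the drivers
theorem foldl_pvD_dedup (block : Int → List (Int × Int × Int)) :
    ∀ (l seen : List Int) (acc : List (Int × Int × Int)),
      (∀ a ∈ seen, ∀ t ∈ block a, t ∈ acc) →
      l.foldl (fun acc a => pvD acc (block a)) acc
        = (pvDedupAux seen l).foldl (fun acc a => pvD acc (block a)) acc := by
  intro l
  induction l with
  | nil => intro seen acc _; rfl
  | cons x l ih =>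
      intro seen acc hseen
      by_cases hx : x ∈ seen
      · simp only [List.foldl_cons, pvDedupAux, if_pos hx]
        rw [pvD_of_subset _ acc (hseen x hx)]
        exact ih seen acc hseen
      · simp only [List.foldl_cons, pvDedupAux, if_neg hx]
        apply ih (seen ++ [x]) (pvD acc (block x))
        intro a ha t ht
        rcases List.mem_append.mp ha with ha | ha
        · exact (mem_pvD t (block x) acc).mpr (Or.inl (hseen a ha t ht))
        · rw [List.mem_singleton] at ha
          rw [ha] at ht
          exact (mem_pvD t (block x) acc).mpr (Or.inr ht)

-- level 3: duplicates in the third list contribute nothing to pvD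
theorem pvD_B3_dedup (a b : Int) (l3 : List Int) (acc : List (Int × Int × Int)) :
    pvD acc (pvB3 a b l3) = pvD acc (pvB3 a b (pvDedup l3)) := by
  have key : ∀ (l : List Int) (acc : List (Int × Int × Int)),
      pvD acc (pvB3 a b l) = l.foldl (fun acc c => pvD acc (pvG a b c)) acc := by
    intro l acc
    simp only [pvD, pvB3]
    exact pvFoldl_flatMap _ (pvG a b) l acc
  rw [key, key, pvDedup_def]
  exact foldl_pvD_dedup (pvG a b) l3 [] acc (by simp)

-- level 2: dedup the second list (and push level 3 through)
theorem pvD_B2_dedup (a : Int) (l2 l3 : List Int) (acc : List (Int × Int × Int)) :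
    pvD acc (pvB2 a l2 l3) = pvD acc (pvB2 a (pvDedup l2) (pvDedup l3)) := by
  have key : ∀ (l2 l3 : List Int) (acc : List (Int × Int × Int)),
      pvD acc (pvB2 a l2 l3) = l2.foldl (fun acc b => pvD acc (pvB3 a b l3)) acc := by
    intro l2 l3 acc
    simp only [pvD, pvB2]
    exact pvFoldl_flatMap _ _ l2 acc
  rw [key, key]
  have step : ∀ (acc : List (Int × Int × Int)),
      l2.foldl (fun acc b => pvD acc (pvB3 a b l3)) acc
        = l2.foldl (fun acc b => pvD acc (pvB3 a b (pvDedup l3))) acc := by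
    intro acc
    apply PySem.List.foldl_congr_mem
    intro acc b _
    exact pvD_B3_dedup a b l3 acc
  rw [step, pvDedup_def l2]
  exact foldl_pvD_dedup (fun b => pvB3 a b (pvDedup l3)) l2 [] acc (by simp)

-- level 1: the whole stream deduplicates to the stream over the deduplicated lists
theorem pvD_stream_dedup (l1 l2 l3 : List Int) :
    pvD [] (pvStream l1 l2 l3) = pvD [] (pvStream (pvDedup l1) (pvDedup l2) (pvDedup l3)) := by
  have key : ∀ (l1 l2 l3 : List Int) (acc : List (Int × Int × Int)),
      pvD acc (pvStream l1 l2 l3) = l1.foldl (fun acc a => pvD acc (pvB2 a l2 l3)) acc := by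
    intro l1 l2 l3 acc
    simp only [pvD, pvStream]
    exact pvFoldl_flatMap _ _ l1 acc
  rw [key, key]
  have step : ∀ (acc : List (Int × Int × Int)),
      l1.foldl (fun acc a => pvD acc (pvB2 a l2 l3)) acc
        = l1.foldl (fun acc a => pvD acc (pvB2 a (pvDedup l2) (pvDedup l3))) acc := by
    intro acc
    apply PySem.List.foldl_congr_mem
    intro acc a _
    exact pvD_B2_dedup a l2 l3 acc
  rw [step, pvDedup_def l1]
  exact foldl_pvD_dedup (fun a => pvB2 a (pvDedup l2) (pvDedup l3)) l1 [] [] (by simp)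

-- membership projections of the blocks
theorem mem_pvG {a b c : Int} {t : Int × Int × Int} (h : t ∈ pvG a b c) :
    t = (a, b, c) := by
  by_cases hc : a = b ∨ a = c ∨ b = c <;> simp [pvG, hc] at h
  simp [h]

theorem mem_pvB3 {a b : Int} {l3 : List Int} {t : Int × Int × Int} (h : t ∈ pvB3 a b l3) :
    t.1 = a ∧ t.2.1 = b := by
  rcases List.mem_flatMap.mp h with ⟨c, _, hc⟩
  rw [mem_pvG hc]
  exact ⟨rfl, rfl⟩

theorem mem_pvB2 {a : Int} {l2 l3 : List Int} {t : Int × Int × Int} (h : t ∈ pvB2 a l2 l3) :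
    t.1 = a := by
  rcases List.mem_flatMap.mp h with ⟨b, _, hb⟩
  exact (mem_pvB3 hb).1

theorem nodup_pvB3 (a b : Int) {l3 : List Int} (h3 : l3.Nodup) : (pvB3 a b l3).Nodup := by
  apply List.nodup_flatMap.mpr
  refine ⟨fun c _ => ?_, ?_⟩
  · by_cases hc : a = b ∨ a = c ∨ b = c <;> simp [pvG, hc]
  · refine h3.imp ?_
    intro c c' hne
    intro t ht ht'
    have h12 := (mem_pvG ht).symm.trans (mem_pvG ht')
    exact hne (by simpa using h12)

theorem nodup_pvB2 (a : Int) {l2 l3 : List Int} (h2 : l2.Nodup) (h3 : l3.Nodup) :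
    (pvB2 a l2 l3).Nodup := by
  apply List.nodup_flatMap.mpr
  refine ⟨fun b _ => nodup_pvB3 a b h3, ?_⟩
  refine h2.imp ?_
  intro b b' hne t ht ht'
  exact hne ((mem_pvB3 ht).2 ▸ (mem_pvB3 ht').2 ▸ rfl)

theorem nodup_pvStream {l1 l2 l3 : List Int} (h1 : l1.Nodup) (h2 : l2.Nodup) (h3 : l3.Nodup) :
    (pvStream l1 l2 l3).Nodup := by
  apply List.nodup_flatMap.mpr
  refine ⟨fun a _ => nodup_pvB2 a h2 h3, ?_⟩
  refine h1.imp ?_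
  intro a a' hne t ht ht'
  exact hne ((mem_pvB2 ht) ▸ (mem_pvB2 ht') ▸ rfl)

-- A computes the first-occurrence dedup of the stream
theorem A_eq_pvD (l1 l2 l3 : List Int) :
    get_unique_trifectas l1 l2 l3 = pvD [] (pvStream l1 l2 l3) := by
  simp only [pvD, pvStream, get_unique_trifectas]
  rw [pvFoldl_flatMap]
  apply PySem.List.foldl_congr_mem
  intro acc a _
  simp only [pvB2]
  rw [pvFoldl_flatMap]
  apply PySem.List.foldl_congr_mem
  intro acc b _
  simp only [pvB3]
  rw [pvFoldl_flatMap]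
  apply PySem.List.foldl_congr_mem
  intro acc c _
  by_cases hc : a = b ∨ a = c ∨ b = c
  · simp [pvG, hc]
  · simp [pvG, hc]

-- B computes the stream over the deduplicated lists
theorem B_eq_stream (l1 l2 l3 : List Int) :
    get_unique_trifectas_alt l1 l2 l3 = pvStream (pvDedup l1) (pvDedup l2) (pvDedup l3) := by
  simp only [get_unique_trifectas_alt, pvStream]
  have h3 : ∀ (a b : Int) (acc : List (Int × Int × Int)),
      (pvDedup l3).foldl (fun acc c =>
        if a ≠ b ∧ a ≠ c ∧ b ≠ c then acc ++ [(a, b, c)] else acc) acc = acc ++ pvB3 a b (pvDedup l3) := by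
    intro a b acc
    have : ∀ acc, (pvDedup l3).foldl (fun acc c => acc ++ pvG a b c) acc = acc ++ pvB3 a b (pvDedup l3) := by
      intro acc
      simp only [pvB3]
      exact PySem.List.foldl_append_eq_flatMap _ _ _
    rw [← this acc]
    apply PySem.List.foldl_congr_mem
    intro acc c _
    by_cases hc : a = b ∨ a = c ∨ b = c
    · have : ¬(a ≠ b ∧ a ≠ c ∧ b ≠ c) := by tauto
      simp [pvG, hc, this]
    · have : a ≠ b ∧ a ≠ c ∧ b ≠ c := by tauto
      simp [pvG, this]
  have h2 : ∀ (a : Int) (acc : List (Int × Int × Int)),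
      (pvDedup l2).foldl (fun acc b =>
        (pvDedup l3).foldl (fun acc c =>
          if a ≠ b ∧ a ≠ c ∧ b ≠ c then acc ++ [(a, b, c)] else acc) acc) acc
        = acc ++ pvB2 a (pvDedup l2) (pvDedup l3) := by
    intro a acc
    have : ∀ acc, (pvDedup l2).foldl (fun acc b => acc ++ pvB3 a b (pvDedup l3)) acc
        = acc ++ pvB2 a (pvDedup l2) (pvDedup l3) := by
      intro acc
      simp only [pvB2]
      exact PySem.List.foldl_append_eq_flatMap _ _ _
    rw [← this acc]
    apply PySem.List.foldl_congr_mem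
    intro acc b _
    exact h3 a b acc
  have h1 : ∀ acc, (pvDedup l1).foldl (fun acc a => acc ++ pvB2 a (pvDedup l2) (pvDedup l3)) acc
      = acc ++ (pvDedup l1).flatMap (fun a => pvB2 a (pvDedup l2) (pvDedup l3)) :=
    fun acc => PySem.List.foldl_append_eq_flatMap _ _ _
  rw [← List.nil_append ((pvDedup l1).flatMap _), ← h1 []]
  apply PySem.List.foldl_congr_mem
  intro acc a _
  exact h2 a acc

-- ===== VERDICT (by name: the statement is the Claim_ definition above) =====
theorem get_unique_trifectas_spec : Claim_equal_get_unique_trifectas := by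
  intro l1 l2 l3 _
  unfold Spec_get_unique_trifectas
  rw [A_eq_pvD, pvD_stream_dedup, B_eq_stream]
  have hnd : (pvStream (pvDedup l1) (pvDedup l2) (pvDedup l3)).Nodup :=
    nodup_pvStream (nodup_pvDedup l1) (nodup_pvDedup l2) (nodup_pvDedup l3)
  rw [pvD_nodup_disjoint _ [] hnd (by simp)]
  simp
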